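-- pv_equiv track=rewrite | github.com/rogerlew/wepppy | tools/check_broad_exceptions.py | _is_markdown_table_delimiter
-- ===== SOURCE A (Python) =====
-- from typing import Iterable, Sequence
--
-- def _is_markdown_table_delimiter(cells: Sequence[str]) -> bool:
--     for cell in cells:
--         token = cell.strip()
--         if not token:
--             continue
--         if any(ch not in "-: " for ch in token):
--             return False
--     return True
-- ===== SOURCE B (Python) =====
-- def _is_markdown_table_delimiter(cells) -> bool:
--     # Aggregate every character of all stripped cells into ONE set, then a
--     # single subset test against the allowed alphabet decides validity.
--     seen = set()
--     for cell in cells: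
--         seen.update(cell.strip())
--     return seen <= set("-: ")
-- ===== Notes on version B (the rewrite author's own statement) =====
-- stated objective: alternative
-- what changed: Instead of validating each cell separately with an early-return per-character membership scan, B aggregates the characters of all stripped cells into one set in a single pass and decides with a single subset test against {'-', ':', ' '}.
import Mathlib
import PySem

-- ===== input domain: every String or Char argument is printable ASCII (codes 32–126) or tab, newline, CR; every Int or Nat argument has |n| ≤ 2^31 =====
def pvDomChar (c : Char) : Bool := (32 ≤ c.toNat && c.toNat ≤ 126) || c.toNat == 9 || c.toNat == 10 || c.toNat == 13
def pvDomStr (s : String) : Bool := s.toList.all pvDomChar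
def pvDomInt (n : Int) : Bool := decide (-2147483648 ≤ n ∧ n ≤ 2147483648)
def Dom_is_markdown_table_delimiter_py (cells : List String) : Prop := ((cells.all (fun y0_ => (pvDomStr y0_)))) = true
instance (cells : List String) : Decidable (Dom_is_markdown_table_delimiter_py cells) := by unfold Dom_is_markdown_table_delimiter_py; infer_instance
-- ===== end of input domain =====

-- ===== PORT A =====
-- A: loop over cells; skip empty stripped tokens; fail on any char outside "-: ".
def is_markdown_table_delimiter_py : List String → Bool
  | [] => true
  | cell :: rest =>
    let token := PySem.Chars.strip cell.toList
    if token.isEmpty then is_markdown_table_delimiter_py rest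
    else if token.any (fun ch => !("-: ".toList.contains ch)) then false
    else is_markdown_table_delimiter_py rest

-- ===== PORT B =====
-- B: one pass collecting all stripped cells' characters into a set, then one subset test.
def is_markdown_table_delimiter_py_alt (cells : List String) : Bool :=
  let seen : PySem.Set Char :=
    cells.foldl (fun s cell => PySem.Set.update s (PySem.Chars.strip cell.toList)) PySem.Set.empty
  PySem.Set.issubset seen (PySem.Set.ofList "-: ".toList)

-- ===== PRECONDITION & SPEC =====
def Spec_is_markdown_table_delimiter_py (cells : List String) (out : Bool) : Prop := out = is_markdown_table_delimiter_py_alt cells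
instance (cells : List String) (out : Bool) : Decidable (Spec_is_markdown_table_delimiter_py cells out) := by unfold Spec_is_markdown_table_delimiter_py; infer_instance

-- ===== CLAIM =====
def Claim_equal_is_markdown_table_delimiter_py : Prop := ∀ (cells : List String), Dom_is_markdown_table_delimiter_py cells → Spec_is_markdown_table_delimiter_py cells (is_markdown_table_delimiter_py cells)

-- ===== LEMMAS AND PROOFS =====

-- membership in B's accumulated set: a char is seen iff it is in some stripped cell (or the seed)
lemma mem_seen (cells : List String) (s : PySem.Set Char) (x : Char) :
    (x ∈ cells.foldl (fun s cell => PySem.Set.update s (PySem.Chars.strip cell.toList)) s) ↔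
    x ∈ s ∨ ∃ c ∈ cells, x ∈ PySem.Chars.strip c.toList := by
  induction cells generalizing s with
  | nil => simp
  | cons c rest ih =>
    simp only [List.foldl_cons, ih, PySem.Set.mem_update, List.mem_cons]
    constructor
    · rintro (( h | h) | ⟨d, hd, hx⟩)
      · exact Or.inl h
      · exact Or.inr ⟨c, Or.inl rfl, h⟩
      · exact Or.inr ⟨d, Or.inr hd, hx⟩
    · rintro (h | ⟨d, (rfl | hd), hx⟩)
      · exact Or.inl (Or.inl h)
      · exact Or.inl (Or.inr hx)
      · exact Or.inr ⟨d, hd, hx⟩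

-- A returns true iff every char of every stripped cell is in "-: "
lemma a_true_iff (cells : List String) :
    is_markdown_table_delimiter_py cells = true ↔
    ∀ c ∈ cells, ∀ x ∈ PySem.Chars.strip c.toList, x ∈ "-: ".toList := by
  induction cells with
  | nil => simp [is_markdown_table_delimiter_py]
  | cons c rest ih =>
    simp only [is_markdown_table_delimiter_py]
    by_cases he : (PySem.Chars.strip c.toList).isEmpty = true
    · rw [if_pos he, ih]
      have : PySem.Chars.strip c.toList = [] := List.isEmpty_iff.mp he
      constructor
      · intro h d hd
        rcases List.mem_cons.mp hd with rfl | hd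
        · rw [this]; intro x hx; cases hx
        · exact h d hd
      · intro h d hd; exact h d (List.mem_cons_of_mem _ hd)
    · rw [if_neg he]
      by_cases ha : (PySem.Chars.strip c.toList).any (fun ch => !("-: ".toList.contains ch)) = true
      · rw [if_pos ha]
        rcases List.any_eq_true.mp ha with ⟨x, hx, hpx⟩
        simp only [Bool.false_eq_true, false_iff]
        intro h
        have hmem := h c (List.mem_cons_self) x hx
        simp at hpx hmem
        rcases hmem with rfl | rfl | rfl <;> simp_all
      · rw [if_neg ha, ih]
        constructor
        · intro h d hd
          rcases List.mem_cons.mp hd with rfl | hd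
          · intro x hx
            by_contra hc
            exact ha (List.any_eq_true.mpr ⟨x, hx, by simp; simpa using hc⟩)
          · exact h d hd
        · intro h d hd; exact h d (List.mem_cons_of_mem _ hd)

lemma ab_eq (cells : List String) :
    is_markdown_table_delimiter_py cells = is_markdown_table_delimiter_py_alt cells := by
  rw [Bool.eq_iff_iff, a_true_iff]
  simp only [is_markdown_table_delimiter_py_alt]
  rw [PySem.Set.issubset_iff]
  constructor
  · intro h x hx
    rcases (mem_seen cells PySem.Set.empty x).mp hx with h0 | ⟨c, hc, hxc⟩
    · cases h0
    · exact (PySem.Set.mem_ofList _ _).mpr (h c hc x hxc)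
  · intro h c hc x hx
    have := h x ((mem_seen cells PySem.Set.empty x).mpr (Or.inr ⟨c, hc, hx⟩))
    exact (PySem.Set.mem_ofList _ _).mp this

-- ===== VERDICT =====
theorem is_markdown_table_delimiter_py_spec : Claim_equal_is_markdown_table_delimiter_py := by
  intro cells _
  exact ab_eq cells
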